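-- pv_equiv track=rewrite | github.com/winstonww/wwsokobanbot | hungarian.py | create_bipartite_graph
-- ===== SOURCE A (Python) =====
-- def create_bipartite_graph(d):
--     '''
--     This function creates a bipartite grapg based on d
--     using list over dict implementaion for edges for efficiency
--     @return
--         R: list where index are row vertices and value at the index
--         correspondsin to the adjacency list
--         C: same as above except idx is col this time
--     '''
--     R = [ [] for row in d ]
--     C = [ [] for col in d[0] ]
--     for i,_ in enumerate(R):
--         for j,_ in enumerate(C):
--             if d[i][j] == 0:
--                 R[i] += [j]
--                 C[j] += [i]
--     return R, C
-- ===== SOURCE B (Python) =====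
-- def create_bipartite_graph(d):
--     ncols = len(d[0])
--     edges = [(i, j) for i, row in enumerate(d) for j in range(ncols) if row[j] == 0]
--     R = [[] for _ in d]
--     for i, j in edges:
--         R[i].append(j)
--     C = [[] for _ in range(ncols)]
--     for i, j in sorted(edges, key=lambda e: (e[1], e[0])):
--         C[j].append(i)
--     return R, C
-- ===== Notes on version B (the rewrite author's own statement) =====
-- stated objective: alternative
-- what changed: B first extracts the zero cells as one flat row-major edge list, fills R by grouping those edges, and obtains C by sorting the edge list by (column,row) key and grouping, replacing A's fused nested loop that mutates both adjacency lists cell by cell.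
-- outside the precondition, e.g. on create_bipartite_graph([]): A raises IndexError, B raises IndexError
import Mathlib
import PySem

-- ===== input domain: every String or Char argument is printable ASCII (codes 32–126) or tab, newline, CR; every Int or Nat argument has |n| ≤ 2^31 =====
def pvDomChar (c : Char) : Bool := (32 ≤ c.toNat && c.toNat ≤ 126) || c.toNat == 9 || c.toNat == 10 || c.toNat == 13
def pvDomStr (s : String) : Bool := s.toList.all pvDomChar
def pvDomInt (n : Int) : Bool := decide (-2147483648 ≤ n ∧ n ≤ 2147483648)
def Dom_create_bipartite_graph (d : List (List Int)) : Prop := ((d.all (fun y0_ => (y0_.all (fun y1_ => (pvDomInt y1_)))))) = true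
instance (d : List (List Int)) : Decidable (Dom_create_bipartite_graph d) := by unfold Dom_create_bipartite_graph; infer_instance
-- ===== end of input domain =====

-- B extracts the zero cells as one flat row-major edge list, fills R by grouping those
-- edges, and obtains C by sorting the edge list by (column,row) key and grouping, instead
-- of A's fused nested loop mutating both adjacency lists cell by cell.

-- ===== PORT A =====
def create_bipartite_graph (d : List (List Int)) : List (List Int) × List (List Int) :=
  let R0 : List (List Int) := d.map (fun _ => [])
  let C0 : List (List Int) := (d.headD []).map (fun _ => [])
  (List.range R0.length).foldl (fun RC i =>
    (List.range C0.length).foldl (fun RC j =>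
      if (d.getD i []).getD j 1 == 0 then
        (RC.1.set i (RC.1.getD i [] ++ [(j : Int)]), RC.2.set j (RC.2.getD j [] ++ [(i : Int)]))
      else RC) RC) (R0, C0)

-- ===== PORT B =====
def create_bipartite_graph_alt (d : List (List Int)) : List (List Int) × List (List Int) :=
  let ncols := (d.headD []).length
  let edges : List (Int × Int) :=
    (PySem.List.enumerate d).flatMap (fun p =>
      ((List.range ncols).filter (fun j => p.2.getD j 1 == 0)).map (fun j => (p.1, (j : Int))))
  let R : List (List Int) :=
    edges.foldl (fun R e => R.set e.1.toNat (R.getD e.1.toNat [] ++ [e.2])) (d.map (fun _ => []))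
  let C : List (List Int) :=
    (PySem.List.sorted2 edges (fun e => e.2) (fun e => e.1)).foldl
      (fun C e => C.set e.2.toNat (C.getD e.2.toNat [] ++ [e.1]))
      ((List.range ncols).map (fun _ => ([] : List Int)))
  (R, C)

-- ===== PRECONDITION & SPEC =====
-- Pre_ excludes exactly the inputs on which the Python A raises IndexError:
-- d = [] (the access d[0]) and jagged matrices with some row shorter than the first row (d[i][j]).
def Pre_create_bipartite_graph (d : List (List Int)) : Prop :=
  d ≠ [] ∧ ∀ row ∈ d, (d.headD []).length ≤ row.length
instance (d : List (List Int)) : Decidable (Pre_create_bipartite_graph d) := by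
  unfold Pre_create_bipartite_graph; infer_instance
def pvWitness_create_bipartite_graph : List (List Int) := [[0, 1], [1, 0]]
def Spec_create_bipartite_graph (d : List (List Int)) (out : List (List Int) × List (List Int)) : Prop := out = create_bipartite_graph_alt d
instance (d : List (List Int)) (out : List (List Int) × List (List Int)) : Decidable (Spec_create_bipartite_graph d out) := by unfold Spec_create_bipartite_graph; infer_instance

-- ===== CLAIM (what is proved, stated in full; the proofs are below) =====
def Claim_equal_create_bipartite_graph : Prop := ∀ (d : List (List Int)), Dom_create_bipartite_graph d → Pre_create_bipartite_graph d → Spec_create_bipartite_graph d (create_bipartite_graph d)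

-- ===== LEMMAS AND PROOFS =====

-- abbreviations for the proofs: the zero columns of row i, the zero rows of column j,
-- and the zero cells in row-major and in column-major order (over Nat, cast once)
def pvZeros (d : List (List Int)) (i : Nat) : List Nat :=
  (List.range (d.headD []).length).filter (fun j => (d.getD i []).getD j 1 == 0)
def pvCols (d : List (List Int)) (j : Nat) : List Nat :=
  (List.range d.length).filter (fun i => (d.getD i []).getD j 1 == 0)
def pvCast (p : Nat × Nat) : Int × Int := ((p.1 : Int), (p.2 : Int))
def pvRowMajorN (d : List (List Int)) : List (Nat × Nat) :=
  (List.range d.length).flatMap (fun i => (pvZeros d i).map (fun j => (i, j)))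
def pvColMajorN (d : List (List Int)) : List (Nat × Nat) :=
  (List.range (d.headD []).length).flatMap (fun j => (pvCols d j).map (fun i => (i, j)))
def pvAppStep (d : List (List Int)) (C : List (List Int)) (i : Nat) : List (List Int) :=
  (pvZeros d i).foldl (fun C j => C.set j (C.getD j [] ++ [(i : Int)])) C

-- A's inner loop updates R and C independently, so the pair fold splits into two folds.
lemma pv_inner_split (d : List (List Int)) (m i : Nat) (R C : List (List Int)) :
    (List.range m).foldl (fun (RC : List (List Int) × List (List Int)) j =>
      if (d.getD i []).getD j 1 == 0 then
        (RC.1.set i (RC.1.getD i [] ++ [(j : Int)]), RC.2.set j (RC.2.getD j [] ++ [(i : Int)]))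
      else RC) (R, C)
    = ((List.range m).foldl (fun R j => if (d.getD i []).getD j 1 == 0 then
          R.set i (R.getD i [] ++ [(j : Int)]) else R) R,
       (List.range m).foldl (fun C j => if (d.getD i []).getD j 1 == 0 then
          C.set j (C.getD j [] ++ [(i : Int)]) else C) C) := by
  have h : (fun (RC : List (List Int) × List (List Int)) (j : Nat) =>
      if (d.getD i []).getD j 1 == 0 then
        (RC.1.set i (RC.1.getD i [] ++ [(j : Int)]), RC.2.set j (RC.2.getD j [] ++ [(i : Int)]))
      else RC)
      = (fun RC j =>
        (if (d.getD i []).getD j 1 == 0 then RC.1.set i (RC.1.getD i [] ++ [(j : Int)]) else RC.1,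
         if (d.getD i []).getD j 1 == 0 then RC.2.set j (RC.2.getD j [] ++ [(i : Int)]) else RC.2)) := by
    funext RC j; split <;> simp
  rw [h, PySem.List.foldl_prod_mk
    (f := fun (R : List (List Int)) (j : Nat) => if (d.getD i []).getD j 1 == 0 then
      R.set i (R.getD i [] ++ [(j : Int)]) else R)
    (g := fun (C : List (List Int)) (j : Nat) => if (d.getD i []).getD j 1 == 0 then
      C.set j (C.getD j [] ++ [(i : Int)]) else C)]

-- A's outer loop, with the inner loop split, is two independent outer loops.
lemma pv_outer_split (d : List (List Int)) (m : Nat) (l : List Nat) (R C : List (List Int)) :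
    l.foldl (fun RC i =>
      (List.range m).foldl (fun (RC : List (List Int) × List (List Int)) j =>
        if (d.getD i []).getD j 1 == 0 then
          (RC.1.set i (RC.1.getD i [] ++ [(j : Int)]), RC.2.set j (RC.2.getD j [] ++ [(i : Int)]))
        else RC) RC) (R, C)
    = (l.foldl (fun R i => (List.range m).foldl (fun R j => if (d.getD i []).getD j 1 == 0 then
          R.set i (R.getD i [] ++ [(j : Int)]) else R) R) R,
       l.foldl (fun C i => (List.range m).foldl (fun C j => if (d.getD i []).getD j 1 == 0 then
          C.set j (C.getD j [] ++ [(i : Int)]) else C) C) C) := by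
  induction l generalizing R C with
  | nil => rfl
  | cons i l ih => simp only [List.foldl_cons]; rw [pv_inner_split, ih]

-- appending one element per index, always at the same position, is one set of the whole list
lemma pv_row_fold (i : Nat) (jl : List Nat) (R : List (List Int)) :
    jl.foldl (fun R j => R.set i (R.getD i [] ++ [(j : Int)])) R
    = R.set i (R.getD i [] ++ jl.map (fun (j : Nat) => (j : Int))) := by
  induction jl generalizing R with
  | nil =>
    simp only [List.foldl_nil, List.map_nil, List.append_nil]
    by_cases h : i < R.length
    · rw [List.getD_eq_getElem R [] h, List.set_getElem_self h]
    · rw [List.set_eq_of_length_le (Nat.le_of_not_lt h)]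
  | cons j jl ih =>
    simp only [List.foldl_cons, List.map_cons]
    rw [ih]
    by_cases h : i < R.length
    · rw [List.set_set]
      have hget : (R.set i (R.getD i [] ++ [(j : Int)])).getD i [] = R.getD i [] ++ [(j : Int)] := by
        rw [List.getD_eq_getElem?_getD, List.getElem?_set_self h]; rfl
      rw [hget]
      simp
    · simp [List.set_eq_of_length_le (Nat.le_of_not_lt h)]

-- filling rows 0..k-1 of an all-[] list in increasing index order
lemma pv_fill_rows {α : Type} (dm : List α) (g : Nat → List Int) :
    ∀ k, k ≤ dm.length →
    (List.range k).foldl (fun R i => R.set i (R.getD i [] ++ g i))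
        (dm.map (fun _ => ([] : List Int)))
    = (List.range k).map g ++ (dm.drop k).map (fun _ => ([] : List Int)) := by
  intro k
  induction k with
  | zero => intro _; simp
  | succ k ih =>
    intro hk
    have hklt : k < dm.length := hk
    rw [List.range_succ, List.foldl_append, List.map_append, ih (Nat.le_of_lt hklt)]
    simp only [List.foldl_cons, List.foldl_nil, List.map_cons, List.map_nil]
    rw [List.drop_eq_getElem_cons hklt]
    simp only [List.map_cons]
    have hlen : ((List.range k).map g).length = k := by simp
    have hget : ((List.range k).map g ++
        ([] : List Int) :: (dm.drop (k+1)).map (fun _ => ([] : List Int))).getD k [] = [] := by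
      rw [List.getD_eq_getElem?_getD, List.getElem?_append_right (le_of_eq hlen), hlen]
      simp
    rw [hget, List.set_append_right k _ (le_of_eq hlen), hlen]
    simp

-- tuple-key sort is the single-key sort under the lexicographic order
lemma pv_sorted2_eq_lex {α : Type} (xs : List α) (k1 k2 : α → Int) :
    PySem.List.sorted2 xs k1 k2 false
    = PySem.List.sorted xs (fun x => toLex (k1 x, k2 x)) false := by
  show xs.foldl (fun acc x => PySem.List.insertBy _ x acc) []
      = xs.foldl (fun acc x => PySem.List.insertBy _ x acc) []
  have h : (fun a b => decide (k1 a < k1 b) || (!decide (k1 b < k1 a) && decide (k2 a < k2 b)))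
      = (fun a b => decide ((toLex (k1 a, k2 a) : Lex (Int × Int)) < toLex (k1 b, k2 b))) := by
    funext a b
    rcases lt_trichotomy (k1 a) (k1 b) with h | h | h
    · simp [Prod.Lex.toLex_lt_toLex, h]
    · simp [Prod.Lex.toLex_lt_toLex, h]
    · simp [Prod.Lex.toLex_lt_toLex, h, lt_asymm h, ne_of_gt h]
  rw [h]

lemma pv_nodup_rowN (d : List (List Int)) : (pvRowMajorN d).Nodup := by
  rw [pvRowMajorN, List.nodup_flatMap]
  refine ⟨fun i _ => List.Nodup.map (fun a b h => by simpa using h) ((List.nodup_range).filter _), ?_⟩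
  refine List.Pairwise.imp ?_ (List.pairwise_lt_range)
  intro i1 i2 h x hx hy
  simp only [List.mem_map] at hx hy
  obtain ⟨j1, _, rfl⟩ := hx
  obtain ⟨j2, _, h2⟩ := hy
  have := (Prod.mk.injEq _ _ _ _ ▸ h2.symm : _ ∧ _).1
  omega

lemma pv_nodup_colN (d : List (List Int)) : (pvColMajorN d).Nodup := by
  rw [pvColMajorN, List.nodup_flatMap]
  refine ⟨fun j _ => List.Nodup.map (fun a b h => by simpa using h) ((List.nodup_range).filter _), ?_⟩
  refine List.Pairwise.imp ?_ (List.pairwise_lt_range)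
  intro j1 j2 h x hx hy
  simp only [List.mem_map] at hx hy
  obtain ⟨i1, _, rfl⟩ := hx
  obtain ⟨i2, _, h2⟩ := hy
  have := (Prod.mk.injEq _ _ _ _ ▸ h2.symm : _ ∧ _).2
  omega

-- row-major and column-major orders enumerate the same set of zero cells
lemma pv_permN (d : List (List Int)) : (pvColMajorN d).Perm (pvRowMajorN d) := by
  rw [List.perm_ext_iff_of_nodup (pv_nodup_colN d) (pv_nodup_rowN d)]
  intro e
  simp only [pvColMajorN, pvRowMajorN, pvZeros, pvCols, List.mem_flatMap, List.mem_map,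
    List.mem_filter, List.mem_range]
  constructor
  · rintro ⟨j, hj, i, ⟨hi, hc⟩, rfl⟩
    exact ⟨i, hi, j, ⟨hj, hc⟩, rfl⟩
  · rintro ⟨i, hi, j, ⟨hj, hc⟩, rfl⟩
    exact ⟨j, hj, i, ⟨hi, hc⟩, rfl⟩

-- the column-major order is strictly increasing under the (column, row) key
lemma pv_pairwiseN (d : List (List Int)) :
    List.Pairwise (fun a b => (toLex ((a.2 : Int), (a.1 : Int)) : Lex (Int × Int))
      < toLex ((b.2 : Int), (b.1 : Int))) (pvColMajorN d) := by
  rw [pvColMajorN, List.pairwise_flatMap]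
  constructor
  · intro j _
    rw [List.pairwise_map]
    refine List.Pairwise.imp ?_ ((List.pairwise_lt_range).filter _)
    intro i1 i2 h
    simp only [Prod.Lex.toLex_lt_toLex]
    right
    exact ⟨trivial, by exact_mod_cast h⟩
  · refine List.Pairwise.imp ?_ (List.pairwise_lt_range)
    intro j1 j2 h x hx y hy
    simp only [List.mem_map] at hx hy
    obtain ⟨i1, _, rfl⟩ := hx
    obtain ⟨i2, _, rfl⟩ := hy
    simp only [Prod.Lex.toLex_lt_toLex]
    left
    exact_mod_cast h

-- sorting the row-major edges by (column, row) yields the column-major edges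
lemma pv_sorted_eq (d : List (List Int)) :
    PySem.List.sorted2 ((pvRowMajorN d).map pvCast) (fun e => e.2) (fun e => e.1) false
    = (pvColMajorN d).map pvCast := by
  rw [pv_sorted2_eq_lex]
  refine PySem.List.sorted_eq_of_perm_of_pairwise_lt _ _ (fun e => toLex (e.2, e.1))
    ((pv_permN d).map pvCast) ?_
  rw [List.pairwise_map]
  exact pv_pairwiseN d

-- B's edge list in closed form
lemma pv_edges_eq (d : List (List Int)) :
    (PySem.List.enumerate d).flatMap (fun p =>
      ((List.range (d.headD []).length).filter (fun j => p.2.getD j 1 == 0)).map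
        (fun j => (p.1, (j : Int))))
    = (pvRowMajorN d).map pvCast := by
  rw [PySem.List.enumerate_eq_map_pyRange d ([] : List Int), PySem.List.len_eq,
    PySem.List.pyRange_zero_natCast, pvRowMajorN, List.map_flatMap]
  rw [List.map_map, List.flatMap_map]
  apply List.flatMap_congr
  intro i hi
  simp [pvZeros, pvCast, PySem.List.pyGetD_natCast, List.map_map, Function.comp, ← List.map_eq_flatMap]

-- a fold over the set-append step preserves the length
lemma pv_app_len (v : List Int) (jl : List Nat) (C : List (List Int)) :
    (jl.foldl (fun C j => C.set j (C.getD j [] ++ v)) C).length = C.length := by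
  induction jl generalizing C with
  | nil => rfl
  | cons j jl ih => rw [List.foldl_cons, ih, List.length_set]

lemma pv_outerC_len (d : List (List Int)) (il : List Nat) (C : List (List Int)) :
    (il.foldl (pvAppStep d) C).length = C.length := by
  induction il generalizing C with
  | nil => rfl
  | cons i il ih => simpa [List.foldl_cons, pvAppStep] using (ih (pvAppStep d C i)).trans (pv_app_len _ _ _)

-- one row pass touches each column index at most once
lemma pv_app_getD (v : List Int) (jl : List Nat) (hnd : jl.Nodup) (C : List (List Int)) (k : Nat) :
    (jl.foldl (fun C j => C.set j (C.getD j [] ++ v)) C).getD k []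
    = if k ∈ jl ∧ k < C.length then C.getD k [] ++ v else C.getD k [] := by
  induction jl generalizing C with
  | nil => simp
  | cons j jl ih =>
    rcases List.nodup_cons.mp hnd with ⟨hj, hnd'⟩
    rw [List.foldl_cons, ih hnd']
    by_cases hkj : k = j
    · subst hkj
      have hknotin : k ∉ jl := hj
      by_cases hlt : k < C.length
      · simp only [List.length_set, hknotin, if_false, List.mem_cons, true_or, hlt,
          and_true, if_true]
        rw [List.getD_eq_getElem?_getD, List.getElem?_set_self hlt]
        simp [List.getD_eq_getElem?_getD]
      · rw [List.set_eq_of_length_le (Nat.le_of_not_lt hlt)]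
        simp [hknotin, hlt]
    · have hset : (C.set j (C.getD j [] ++ v)).getD k [] = C.getD k [] := by
        rw [List.getD_eq_getElem?_getD, List.getElem?_set_ne (fun h => hkj h.symm)]
        rw [List.getD_eq_getElem?_getD]
      rw [List.length_set, hset]
      by_cases hmem : k ∈ jl <;> simp [hmem, hkj, List.mem_cons]

-- A's column fold, pointwise: column k collects the rows whose zero set contains k
lemma pv_outerC_getD (d : List (List Int)) (il : List Nat) (C : List (List Int)) (k : Nat)
    (hk : k < C.length) :
    (il.foldl (pvAppStep d) C).getD k []
    = C.getD k [] ++ (il.filter (fun i => decide (k ∈ pvZeros d i))).map (fun (i : Nat) => (i : Int)) := by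
  induction il generalizing C with
  | nil => simp
  | cons i il ih =>
    have hnd : (pvZeros d i).Nodup := (List.nodup_range).filter _
    have hlen : (pvAppStep d C i).length = C.length := pv_app_len _ _ _
    rw [List.foldl_cons, ih (pvAppStep d C i) (hlen ▸ hk)]
    have hstep : (pvAppStep d C i).getD k []
        = if k ∈ pvZeros d i then C.getD k [] ++ [(i : Int)] else C.getD k [] := by
      rw [pvAppStep, pv_app_getD _ _ hnd]
      by_cases hm : k ∈ pvZeros d i <;> simp [hm, hk]
    rw [hstep]
    by_cases hm : k ∈ pvZeros d i <;> simp [hm]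

-- A's C in closed form
lemma pv_AC_eq (d : List (List Int)) :
    (List.range d.length).foldl (pvAppStep d) ((d.headD []).map (fun _ => ([] : List Int)))
    = (List.range (d.headD []).length).map (fun j => (pvCols d j).map (fun (i : Nat) => (i : Int))) := by
  apply List.ext_getElem
  · rw [pv_outerC_len]; simp
  · intro k h1 h2
    have hkm : k < (d.headD []).length := by
      rw [pv_outerC_len] at h1; simpa using h1
    have hk' : k < ((d.headD []).map (fun _ => ([] : List Int))).length := by simpa using hkm
    have h0 : ((d.headD []).map (fun _ => ([] : List Int))).getD k [] = [] := by
      rw [List.getD_eq_getElem _ _ hk']; simp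
    rw [← List.getD_eq_getElem _ ([] : List Int) h1, pv_outerC_getD d _ _ k hk', h0]
    have hfil : (List.range d.length).filter (fun i => decide (k ∈ pvZeros d i)) = pvCols d k := by
      rw [pvCols]
      apply List.filter_congr
      intro i hi
      have hkm' : k < (d.head?.getD []).length := by
        cases d with
        | nil => simp at hkm
        | cons a t => simpa using hkm
      simp [pvZeros, List.mem_filter, List.mem_range, hkm', ← Bool.beq_eq_decide_eq]
    rw [hfil]
    simp

-- ===== VERDICT (by name: the statement is the Claim_ definition above) =====
theorem create_bipartite_graph_spec : Claim_equal_create_bipartite_graph := by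
  intro d _ _
  unfold Spec_create_bipartite_graph
  simp only [create_bipartite_graph, create_bipartite_graph_alt, List.length_map]
  rw [pv_outer_split, pv_edges_eq, pv_sorted_eq, Prod.mk.injEq]
  refine ⟨?_, ?_⟩
  · -- R components
    have hstepA : (fun (R : List (List Int)) (i : Nat) =>
        (List.range (d.headD []).length).foldl (fun R j => if (d.getD i []).getD j 1 == 0 then
          R.set i (R.getD i [] ++ [(j : Int)]) else R) R)
        = (fun R i => R.set i (R.getD i [] ++ (pvZeros d i).map (fun (j : Nat) => (j : Int)))) := by
      funext R i
      rw [PySem.List.foldl_if_eq_foldl_filter, pv_row_fold, pvZeros]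
    rw [hstepA, List.foldl_map, pvRowMajorN, List.foldl_flatMap]
    have hstepB : (fun (R : List (List Int)) (i : Nat) =>
        ((pvZeros d i).map (fun j => (i, j))).foldl
          (fun R p => R.set (pvCast p).1.toNat (R.getD (pvCast p).1.toNat [] ++ [(pvCast p).2])) R)
        = (fun R i => R.set i (R.getD i [] ++ (pvZeros d i).map (fun (j : Nat) => (j : Int)))) := by
      funext R i
      rw [List.foldl_map]
      simp only [pvCast, Int.toNat_natCast]
      exact pv_row_fold i (pvZeros d i) R
    rw [hstepB]
  · -- C components
    have hstepA : (fun (C : List (List Int)) (i : Nat) =>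
        (List.range (d.headD []).length).foldl (fun C j => if (d.getD i []).getD j 1 == 0 then
          C.set j (C.getD j [] ++ [(i : Int)]) else C) C) = pvAppStep d := by
      funext C i
      rw [PySem.List.foldl_if_eq_foldl_filter, pvAppStep, pvZeros]
    rw [hstepA, pv_AC_eq, List.foldl_map, pvColMajorN, List.foldl_flatMap]
    have hstepB : (fun (C : List (List Int)) (j : Nat) =>
        ((pvCols d j).map (fun i => (i, j))).foldl
          (fun C p => C.set (pvCast p).2.toNat (C.getD (pvCast p).2.toNat [] ++ [(pvCast p).1])) C)
        = (fun C j => C.set j (C.getD j [] ++ (pvCols d j).map (fun (i : Nat) => (i : Int)))) := by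
      funext C j
      rw [List.foldl_map]
      simp only [pvCast, Int.toNat_natCast]
      exact pv_row_fold j (pvCols d j) C
    rw [hstepB, pv_fill_rows (List.range (d.headD []).length) _ _ (by simp)]
    simp
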